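-- pv_equiv track=rewrite | github.com/joshanashakya/dissertation | workspace/dataset/java-python/GeeksForGeeks/816/A/2.py | NotParallel
-- ===== SOURCE A (Python) =====
-- def NotParallel(p, n) :
--
--     # This will store the number of points has
--     # same x or y coordinates using the map as
--     # the value of coordinate can be very large
--     x_axis  = {}; y_axis = {};
--
--     for i in range(n) :
--
--         # Counting frequency of each x and y
--         # coordinates
--         if p[i][0] not in x_axis :
--             x_axis[p[i][0]] = 0;
--
--         x_axis[p[i][0]] += 1;
--
--         if p[i][1] not in y_axis :
--             y_axis[p[i][1]] = 0;
--
--         y_axis[p[i][1]] += 1;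
--
--     # Total number of pairs can be formed
--     total = (n * (n - 1)) // 2;
--
--     for i in x_axis :
--         c =  x_axis[i];
--
--         # We can not choose pairs from these as
--         # they have same x coordinatethus they
--         # will result line segment
--         # parallel to y axis
--         total -= (c * (c - 1)) // 2;
--
--     for i in y_axis :
--         c = y_axis[i];
--
--         # we can not choose pairs from these as
--         # they have same y coordinate thus they
--         # will result line segment
--         # parallel to x-axis
--         total -= (c * (c - 1)) // 2;
--
--     # Return the required answer
--     return total;
-- ===== SOURCE B (Python) =====
-- def NotParallel(p, n):
--     xs = sorted([p[i][0] for i in range(n)])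
--     ys = sorted([p[i][1] for i in range(n)])
--     total = n * (n - 1) // 2
--     for vals in (xs, ys):
--         i = 0
--         m = len(vals)
--         while i < m:
--             j = i + 1
--             while j < m and vals[j] == vals[i]:
--                 j += 1
--             c = j - i
--             total -= c * (c - 1) // 2
--             i = j
--     return total
-- ===== Notes on version B (the rewrite author's own statement) =====
-- stated objective: alternative
-- what changed: Replaces the two hash-map frequency dictionaries with sorting each coordinate list and subtracting C(c,2) for each run of equal consecutive values.
import Mathlib
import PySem

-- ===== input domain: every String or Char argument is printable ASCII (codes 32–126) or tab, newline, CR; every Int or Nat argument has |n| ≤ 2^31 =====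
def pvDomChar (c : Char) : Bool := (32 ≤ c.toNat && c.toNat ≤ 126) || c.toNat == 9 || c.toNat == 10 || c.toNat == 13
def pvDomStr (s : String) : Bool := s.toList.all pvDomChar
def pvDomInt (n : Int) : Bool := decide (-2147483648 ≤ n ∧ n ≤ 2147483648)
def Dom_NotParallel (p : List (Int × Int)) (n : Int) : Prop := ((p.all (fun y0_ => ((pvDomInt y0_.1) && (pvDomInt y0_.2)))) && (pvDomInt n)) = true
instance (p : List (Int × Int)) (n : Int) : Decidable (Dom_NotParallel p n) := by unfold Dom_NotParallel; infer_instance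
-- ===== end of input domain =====

-- B sorts each coordinate list and subtracts C(c,2) per run of equal values instead of
-- A's dict frequency counting; equivalence is proved for all n ≤ len(p) (A raises IndexError otherwise).

-- ===== PORT A =====
-- 'if k not in d: d[k] = 0; d[k] += 1' (p[i] is in range under Pre_, so the .getD (0,0) default is never used)
def pvUpd (d : PySem.Dict Int Int) (k : Int) : PySem.Dict Int Int :=
  let d := if d.contains k then d else d.insert k 0
  d.insert k (d.getD k 0 + 1)

def NotParallel (p : List (Int × Int)) (n : Int) : Int :=
  let st := (PySem.List.pyRange 0 n 1).foldl
      (fun (st : PySem.Dict Int Int × PySem.Dict Int Int) i =>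
        let pt := (PySem.List.pyGet? p i).getD (0, 0)
        (pvUpd st.1 pt.1, pvUpd st.2 pt.2))
      (PySem.Dict.empty, PySem.Dict.empty)
  let total := PySem.Int.floordiv (n * (n - 1)) 2
  let total := st.1.keys.foldl
      (fun t k => t - PySem.Int.floordiv (st.1.getD k 0 * (st.1.getD k 0 - 1)) 2) total
  st.2.keys.foldl
      (fun t k => t - PySem.Int.floordiv (st.2.getD k 0 * (st.2.getD k 0 - 1)) 2) total

-- ===== PORT B =====
-- the nested while loops of Source B: outer loop = recursion on the remaining suffix,
-- inner 'while vals[j] == vals[i]' = takeWhile/dropWhile on the tail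
def runPairs : List Int → Int
  | [] => 0
  | x :: rest =>
      let c : Int := 1 + (rest.takeWhile (fun y => y == x)).length
      PySem.Int.floordiv (c * (c - 1)) 2 + runPairs (rest.dropWhile (fun y => y == x))
termination_by l => l.length
decreasing_by
  simp only [List.length_cons]
  exact Nat.lt_succ_of_le (List.length_dropWhile_le _ _)

def NotParallel_alt (p : List (Int × Int)) (n : Int) : Int :=
  let xs := PySem.List.sorted ((PySem.List.pyRange 0 n 1).map
      (fun i => ((PySem.List.pyGet? p i).getD (0, 0)).1)) (fun x => x) false
  let ys := PySem.List.sorted ((PySem.List.pyRange 0 n 1).map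
      (fun i => ((PySem.List.pyGet? p i).getD (0, 0)).2)) (fun x => x) false
  PySem.Int.floordiv (n * (n - 1)) 2 - runPairs xs - runPairs ys

-- ===== PRECONDITION & SPEC =====
-- A (and B) raise IndexError when n > len(p); those inputs are excluded, nothing else is.
def Pre_NotParallel (p : List (Int × Int)) (n : Int) : Prop := n ≤ (p.length : Int)
instance (p : List (Int × Int)) (n : Int) : Decidable (Pre_NotParallel p n) := by unfold Pre_NotParallel; infer_instance
def pvWitness_NotParallel : (List (Int × Int)) × Int := ([(0, 0), (1, 2), (1, 5)], 3)

def Spec_NotParallel (p : List (Int × Int)) (n : Int) (out : Int) : Prop := out = NotParallel_alt p n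
instance (p : List (Int × Int)) (n : Int) (out : Int) : Decidable (Spec_NotParallel p n out) := by unfold Spec_NotParallel; infer_instance

-- ===== CLAIM (what is proved, stated in full; the proofs are below) =====
def Claim_equal_NotParallel : Prop := ∀ (p : List (Int × Int)) (n : Int), Dom_NotParallel p n → Pre_NotParallel p n → Spec_NotParallel p n (NotParallel p n)

-- ===== LEMMAS AND PROOFS =====

def pvF (c : Int) : Int := PySem.Int.floordiv (c * (c - 1)) 2

theorem pvUpd_eq : pvUpd = fun d k => d.insert k (d.getD k 0 + 1) := by
  funext d k
  unfold pvUpd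
  by_cases h : d.contains k = true
  · simp [h]
  · have h0 : d.getD k 0 = 0 := PySem.Dict.getD_of_not_contains d 0 (by simpa using h)
    simp [h, h0]
    rw [PySem.Dict.insert_insert_self]

theorem pairFold (idx : List Int) (g1 g2 : Int → Int) (dx dy : PySem.Dict Int Int) :
    idx.foldl (fun st i => (pvUpd st.1 (g1 i), pvUpd st.2 (g2 i))) (dx, dy)
    = ((idx.map g1).foldl pvUpd dx, (idx.map g2).foldl pvUpd dy) := by
  induction idx generalizing dx dy with
  | nil => simp
  | cons i t ih => simp [List.foldl_cons, ih]

theorem counterFold (xs : List Int) :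
    xs.foldl pvUpd PySem.Dict.empty = PySem.Dict.counter xs := by
  rw [pvUpd_eq]
  exact PySem.Dict.foldl_insert_getD_add_one_eq_counter xs

theorem subFold (l : List Int) (g : Int → Int) (t : Int) :
    l.foldl (fun t k => t - g k) t = t - (l.map g).sum := by
  induction l generalizing t with
  | nil => simp
  | cons k r ih => simp [List.foldl_cons, ih]; ring

theorem sumNodup (L xs : List Int) (g : Int → Int) (hnd : L.Nodup)
    (hmem : ∀ k, k ∈ L ↔ k ∈ xs) :
    (L.map g).sum = ∑ k ∈ xs.toFinset, g k := by
  have hfs : L.toFinset = xs.toFinset := by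
    ext k; simp [List.mem_toFinset, hmem]
  rw [← hfs, List.sum_toFinset g hnd]

theorem not_pred_head_dropWhile {α : Type} (p : α → Bool) :
    ∀ (l : List α) (y : α) (t : List α), l.dropWhile p = y :: t → p y = false := by
  intro l
  induction l with
  | nil => intro y t h; simp [List.dropWhile] at h
  | cons a r ih =>
    intro y t h
    by_cases hp : p a = true
    · rw [List.dropWhile_cons_of_pos hp] at h; exact ih y t h
    · rw [List.dropWhile_cons_of_neg hp] at h
      cases h; simpa using hp

theorem runPairs_sorted : ∀ l : List Int, l.Pairwise (· ≤ ·) →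
    runPairs l = ∑ k ∈ l.toFinset, pvF ((l.count k : Int)) := by
  intro l
  induction l using runPairs.induct with
  | case1 => intro _; simp [runPairs]
  | case2 x rest ih =>
    intro h
    set run := rest.takeWhile (fun y => y == x) with hrun
    set tail := rest.dropWhile (fun y => y == x) with htail
    have hle : ∀ y ∈ rest, x ≤ y := (List.pairwise_cons.mp h).1
    have hrest : rest.Pairwise (· ≤ ·) := (List.pairwise_cons.mp h).2
    have hsplit : run ++ tail = rest := List.takeWhile_append_dropWhile
    have hx_run : ∀ y ∈ run, y = x := by
      intro y hy
      have := List.mem_takeWhile_imp hy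
      simpa using this
    have htail_lt : ∀ z ∈ tail, x < z := by
      cases ht : tail with
      | nil => intro z hz; simp at hz
      | cons y0 t =>
        have hy0 : (y0 == x) = false := not_pred_head_dropWhile _ rest y0 t (htail ▸ ht)
        have hy0ne : y0 ≠ x := by simpa using hy0
        have hsub : tail.Sublist rest := List.dropWhile_sublist _
        have hy0mem : y0 ∈ rest := hsub.subset (by simp [ht])
        have hxy0 : x < y0 := lt_of_le_of_ne (hle y0 hy0mem) (Ne.symm hy0ne)
        have hpt : (y0 :: t).Pairwise (· ≤ ·) := ht ▸ hrest.sublist hsub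
        intro z hz
        rcases List.mem_cons.mp hz with rfl | hz'
        · exact hxy0
        · exact lt_of_lt_of_le hxy0 ((List.pairwise_cons.mp hpt).1 z hz')
    have hx_tail : x ∉ tail := fun hx => lt_irrefl x (htail_lt x hx)
    have hcount : (x :: rest).count x = 1 + run.length := by
      rw [List.count_cons_self, ← hsplit, List.count_append]
      rw [List.count_eq_length.mpr (by intro y hy; simp [hx_run y hy]),
          List.count_eq_zero.mpr hx_tail]
      omega
    have hfin : (x :: rest).toFinset = insert x tail.toFinset := by
      ext k
      simp only [List.toFinset_cons, Finset.mem_insert, List.mem_toFinset, ← hsplit,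
        List.mem_append]
      constructor
      · rintro (hk | hk | hk)
        · exact Or.inl hk
        · exact Or.inl (hx_run k hk)
        · exact Or.inr hk
      · rintro (hk | hk)
        · exact Or.inl hk
        · exact Or.inr (Or.inr hk)
    have hxnot : x ∉ tail.toFinset := by simpa [List.mem_toFinset] using hx_tail
    have hcount_tail : ∀ k ∈ tail.toFinset, (x :: rest).count k = tail.count k := by
      intro k hk
      have hkmem : k ∈ tail := List.mem_toFinset.mp hk
      have hkne : k ≠ x := fun he => lt_irrefl x (he ▸ htail_lt k hkmem)
      have hkrun : List.count k run = 0 :=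
        List.count_eq_zero.mpr (fun hkr => hkne (hx_run k hkr))
      rw [← hsplit]
      simp [List.count_append, Ne.symm hkne, hkrun]
    have htp : tail.Pairwise (· ≤ ·) := hrest.sublist (List.dropWhile_sublist _)
    rw [runPairs, hfin, Finset.sum_insert hxnot, ih htp, hcount]
    have : ∀ k ∈ tail.toFinset, pvF (((x :: rest).count k : Int)) = pvF ((tail.count k : Int)) := by
      intro k hk; rw [hcount_tail k hk]
    rw [Finset.sum_congr rfl this]
    simp only [pvF]
    rw [← hrun]
    push_cast
    ring

-- ===== VERDICT (by name: the statement is the Claim_ definition above) =====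
theorem NotParallel_spec : Claim_equal_NotParallel := by
  intro p n _ _
  unfold Spec_NotParallel NotParallel NotParallel_alt
  simp only []
  set g1 : Int → Int := fun i => ((PySem.List.pyGet? p i).getD (0, 0)).1 with hg1
  set g2 : Int → Int := fun i => ((PySem.List.pyGet? p i).getD (0, 0)).2 with hg2
  set idx := PySem.List.pyRange 0 n 1 with hidx
  set xs := idx.map g1 with hxs
  set ys := idx.map g2 with hys
  have hpair : idx.foldl
      (fun (st : PySem.Dict Int Int × PySem.Dict Int Int) i =>
        let pt := (PySem.List.pyGet? p i).getD (0, 0)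
        (pvUpd st.1 pt.1, pvUpd st.2 pt.2))
      (PySem.Dict.empty, PySem.Dict.empty)
      = (PySem.Dict.counter xs, PySem.Dict.counter ys) := by
    rw [show (fun (st : PySem.Dict Int Int × PySem.Dict Int Int) (i : Int) =>
        let pt := (PySem.List.pyGet? p i).getD (0, 0)
        (pvUpd st.1 pt.1, pvUpd st.2 pt.2))
      = fun (st : PySem.Dict Int Int × PySem.Dict Int Int) i =>
        (pvUpd st.1 (g1 i), pvUpd st.2 (g2 i)) from rfl]
    rw [pairFold, counterFold, counterFold]
  rw [hpair]
  -- A-side: each key loop subtracts the sum over distinct values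
  have hA : ∀ zs : List Int, ∀ t : Int,
      (PySem.Dict.counter zs).keys.foldl
        (fun t k => t - PySem.Int.floordiv ((PySem.Dict.counter zs).getD k 0 *
          ((PySem.Dict.counter zs).getD k 0 - 1)) 2) t
      = t - ∑ k ∈ zs.toFinset, pvF ((zs.count k : Int)) := by
    intro zs t
    rw [subFold ((PySem.Dict.counter zs).keys)
        (fun k => PySem.Int.floordiv ((PySem.Dict.counter zs).getD k 0 *
          ((PySem.Dict.counter zs).getD k 0 - 1)) 2) t]
    congr 1
    rw [PySem.Dict.keys_counter]
    rw [sumNodup (PySem.Set.ofList zs) zs _ (PySem.Set.nodup_ofList zs)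
        (fun k => PySem.Set.mem_ofList zs k)]
    refine Finset.sum_congr rfl fun k _ => ?_
    rw [PySem.Dict.getD_counter]
    rfl
  -- B-side: run scanning over the sorted list gives the same sum
  have hB : ∀ zs : List Int,
      runPairs (PySem.List.sorted zs (fun x => x) false)
      = ∑ k ∈ zs.toFinset, pvF ((zs.count k : Int)) := by
    intro zs
    have hperm : (PySem.List.sorted zs (fun x => x) false).Perm zs :=
      PySem.List.sorted_perm zs _ _
    have hfs : (PySem.List.sorted zs (fun x => x) false).toFinset = zs.toFinset := by
      ext k; simp [List.mem_toFinset, PySem.List.mem_sorted]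
    rw [runPairs_sorted _ (by simpa using PySem.List.sorted_pairwise zs (fun x => x)), hfs]
    exact Finset.sum_congr rfl fun k _ => by rw [hperm.count_eq]
  rw [hA xs, hA ys, hB xs, hB ys]
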